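-- pv_equiv track=rewrite | github.com/miliar/Code_Jam_Webscraper | solutions_python/solutions_year17_round2_nr2/266.py | solve
-- ===== SOURCE A (Python) =====
-- def solve(n, colors):
--     # nColDif = colors.count(0)
--     labels = ['R', 'O', 'Y', 'G', 'B', 'V']
--     colors = [[num, labels[i]] for (i, num) in enumerate(colors)]
--     colors = sorted(colors, reverse=True)
--     if colors[0][0] * 2 > n:
--         return "IMPOSSIBLE"
--     solucio = [colors[0][1]]
--     colors[0][0] -= 1
--     for i in range(n - 3): # nomes R, Y, B
--         colors = sorted(colors, reverse=True)
--         j = 0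
--         while solucio[-1] == colors[j][1]:
--             j += 1
--         solucio.append(colors[j][1])
--         colors[j][0] -= 1
--
--     colors = sorted(colors, reverse=True)
--     if colors[0][1] == solucio[0]:
--         solucio.append(colors[0][1])
--         solucio.append(colors[1][1])
--     else: # elif colors[1][1] == solucio[0]:
--         solucio.append(colors[1][1])
--         solucio.append(colors[0][1])
--
--     return ''.join(solucio)
-- ===== SOURCE B (Python) =====
-- def solve(n, colors):
--     # Max-priority-queue (binary search tree keyed by the (count, label) tuple) instead of
--     # re-sorting per step: pop the max; if its label equals the last placed color, hold it,
--     # pop the runner-up and re-insert the held entry.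
--     def insert(t, k):
--         if t is None:
--             return (k, None, None)
--         key, l, r = t
--         if k < key:
--             return (key, insert(l, k), r)
--         return (key, l, insert(r, k))
--
--     def pop(t):  # remove and return the largest key
--         key, l, r = t
--         if r is None:
--             return key, l
--         m, r2 = pop(r)
--         return m, (key, l, r2)
--
--     t = None
--     for c, lab in zip(colors, 'ROYGBV'):
--         t = insert(t, (c, lab))
--     (c0, l0), t = pop(t)
--     if c0 * 2 > n:
--         return "IMPOSSIBLE"
--     out = [l0]
--     t = insert(t, (c0 - 1, l0))
--     for _ in range(n - 3):
--         k1, t1 = pop(t)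
--         if k1[1] == out[-1]:
--             k2, t2 = pop(t1)
--             out.append(k2[1])
--             t = insert(insert(t2, k1), (k2[0] - 1, k2[1]))
--         else:
--             out.append(k1[1])
--             t = insert(t1, (k1[0] - 1, k1[1]))
--     k1, t1 = pop(t)
--     k2, _ = pop(t1)
--     if k1[1] == out[0]:
--         out.append(k1[1])
--         out.append(k2[1])
--     else:
--         out.append(k2[1])
--         out.append(k1[1])
--     return ''.join(out)
-- ===== Notes on version B (the rewrite author's own statement) =====
-- stated objective: alternative
-- what changed: A re-sorts the whole (count,label) pair list on every loop iteration and scans it; B maintains a max-priority-queue (a binary search tree keyed by the (count,label) tuple) and each step pops the max, holding it and popping the runner-up when its label equals the last placed color, so no sorting happens anywhere.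
-- outside the precondition, e.g. on solve(4, [1, 1, 1, 1, 1, 1, 1]): A raises IndexError, B returns 'YVOR'; on solve(0, []): A raises IndexError, B raises TypeError; on solve(5, [2]): A raises IndexError, B raises TypeError
import Mathlib
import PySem

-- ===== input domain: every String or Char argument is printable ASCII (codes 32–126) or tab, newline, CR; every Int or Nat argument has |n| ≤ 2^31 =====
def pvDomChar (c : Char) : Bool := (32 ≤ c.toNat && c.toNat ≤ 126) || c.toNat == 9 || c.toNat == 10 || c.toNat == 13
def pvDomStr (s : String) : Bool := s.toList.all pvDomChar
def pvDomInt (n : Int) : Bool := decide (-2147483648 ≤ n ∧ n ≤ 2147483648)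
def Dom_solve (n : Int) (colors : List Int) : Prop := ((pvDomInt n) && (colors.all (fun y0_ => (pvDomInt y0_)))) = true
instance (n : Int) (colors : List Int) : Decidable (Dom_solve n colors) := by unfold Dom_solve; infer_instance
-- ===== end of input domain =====

-- B replaces A's full re-sort of the (count,label) pair list in every loop iteration by a
-- max-priority-queue (a BST keyed by the (count,label) tuple): pop the max, and when its label
-- equals the last placed color pop the runner-up and re-insert the held entry — no sorting.

-- ===== PORT A =====
-- Python compares the 2-element lists [num, label] lexicographically; pvKeyA is exactly
-- that comparison key (Prod.Lex = Python tuple/list order on (int, single-char str)).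
def pvKeyA (p : Int × Char) : Int ×ₗ Char := toLex p

-- the `while solucio[-1] == colors[j][1]: j += 1` scan followed by `colors[j][0] -= 1`:
-- returns the updated list and the label appended; [] = Python IndexError (outside Pre_)
def pickA : Char → List (Int × Char) → List (Int × Char) × Char
  | last, [] => ([], last)
  | last, (c, l) :: t =>
    if last = l then
      let r := pickA last t
      ((c, l) :: r.1, r.2)
    else ((c - 1, l) :: t, l)

-- one iteration of A's `for i in range(n - 3)` body
def stepA (st : List Char × List (Int × Char)) : List Char × List (Int × Char) :=
  let s := PySem.List.sorted st.2 pvKeyA true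
  let r := pickA (st.1.getLastD ' ') s
  (st.1 ++ [r.2], r.1)

def solve (n : Int) (colors : List Int) : String :=
  let labels : List Char := ['R', 'O', 'Y', 'G', 'B', 'V']
  -- [[num, labels[i]] for (i, num) in enumerate(colors)]; labels[i] raises IndexError when
  -- len(colors) > 6 (outside Pre_: the pyGetD default is never read inside Pre_)
  let cs0 : List (Int × Char) := (PySem.List.enumerate colors).map (fun p => (p.2, PySem.List.pyGetD labels p.1 ' '))
  match PySem.List.sorted cs0 pvKeyA true with
  | [] => ""  -- Python raises IndexError at colors[0] (outside Pre_)
  | (c0, l0) :: t =>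
    if c0 * 2 > n then "IMPOSSIBLE"
    else
      let st := (PySem.List.pyRange 0 (n - 3) 1).foldl (fun st _ => stepA st) ([l0], (c0 - 1, l0) :: t)
      match PySem.List.sorted st.2 pvKeyA true with
      | (_, b0) :: (_, b1) :: _ =>
        if b0 = st.1.headD ' ' then String.ofList (st.1 ++ [b0, b1]) else String.ofList (st.1 ++ [b1, b0])
      | _ => ""  -- Python raises IndexError at colors[1] (outside Pre_)

-- ===== PORT B =====
-- Source B's tree: None = PQTree.nil, a nested tuple (key, left, right) = PQTree.node
inductive PQTree where
  | nil : PQTree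
  | node : Int × Char → PQTree → PQTree → PQTree
deriving DecidableEq, Repr

-- Source B's `insert` (BST insertion; `k < key` is Python tuple `<`, i.e. the lexicographic
-- order on (count, label) = pvKeyA order)
def PQTree.insert : PQTree → (Int × Char) → PQTree
  | .nil, k => .node k .nil .nil
  | .node key l r, k =>
    if pvKeyA k < pvKeyA key then .node key (l.insert k) r else .node key l (r.insert k)

-- Source B's `pop` (remove and return the largest key, i.e. the rightmost node);
-- none = Python TypeError on unpacking None (outside Pre_)
def PQTree.popMax? : PQTree → Option ((Int × Char) × PQTree)
  | .nil => none
  | .node k l r =>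
    match r.popMax? with
    | none => some (k, l)
    | some (m, r2) => some (m, .node k l r2)

-- one iteration of Source B's loop body (the `none` fallthroughs are Source B's TypeError, outside Pre_)
def stepB (st : List Char × PQTree) : List Char × PQTree :=
  match st.2.popMax? with
  | none => st
  | some (k1, t1) =>
    if k1.2 = st.1.getLastD ' ' then
      match t1.popMax? with
      | none => st
      | some (k2, t2) => (st.1 ++ [k2.2], (t2.insert k1).insert (k2.1 - 1, k2.2))
    else (st.1 ++ [k1.2], t1.insert (k1.1 - 1, k1.2))

def solve_alt (n : Int) (colors : List Int) : String :=
  let items0 : List (Int × Char) := colors.zip (['R', 'O', 'Y', 'G', 'B', 'V'] : List Char)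
  let t0 := items0.foldl (fun t e => t.insert e) PQTree.nil
  match t0.popMax? with
  | none => ""  -- Source B raises TypeError on empty colors (outside Pre_)
  | some ((c0, l0), t1) =>
    if c0 * 2 > n then "IMPOSSIBLE"
    else
      let st := (PySem.List.pyRange 0 (n - 3) 1).foldl (fun st _ => stepB st) ([l0], t1.insert (c0 - 1, l0))
      match st.2.popMax? with
      | none => ""
      | some (k1, t2) =>
        match t2.popMax? with
        | none => ""
        | some (k2, _) =>
          if k1.2 = st.1.headD ' ' then String.ofList (st.1 ++ [k1.2, k2.2]) else String.ofList (st.1 ++ [k2.2, k1.2])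

-- ===== PRECONDITION & SPEC =====
-- Pre_ excludes exactly the inputs where A raises IndexError: empty colors, more than 6
-- colors (labels[i]), and a single color unless the IMPOSSIBLE check fires first.
def Pre_solve (n : Int) (colors : List Int) : Prop :=
  1 ≤ colors.length ∧ colors.length ≤ 6 ∧ (colors.length = 1 → n < 2 * colors.headD 0)
instance (n : Int) (colors : List Int) : Decidable (Pre_solve n colors) := by unfold Pre_solve; infer_instance

def pvWitness_solve : Int × List Int := (6, [2, 2, 2])

def Spec_solve (n : Int) (colors : List Int) (out : String) : Prop := out = solve_alt n colors
instance (n : Int) (colors : List Int) (out : String) : Decidable (Spec_solve n colors out) := by unfold Spec_solve; infer_instance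

-- ===== CLAIM (what is proved, stated in full; the proofs are below) =====
def Claim_equal_solve : Prop := ∀ (n : Int) (colors : List Int), Dom_solve n colors → Pre_solve n colors → Spec_solve n colors (solve n colors)

-- ===== LEMMAS AND PROOFS =====

-- the tree's contents as a list (proof-only)
def PQTree.toList : PQTree → List (Int × Char)
  | .nil => []
  | .node k l r => k :: (l.toList ++ r.toList)

-- binary-search-tree property (strict on the left; keys are distinct anyway)
def IsBST : PQTree → Prop
  | .nil => True
  | .node k l r => (∀ e ∈ l.toList, pvKeyA e < pvKeyA k) ∧ (∀ e ∈ r.toList, pvKeyA k ≤ pvKeyA e) ∧ IsBST l ∧ IsBST r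

-- "m is the element the priority queue must yield from xs with `exc` excluded": admissible
-- and strictly key-greater than every other admissible element
def IsSel (exc : Option Char) (xs : List (Int × Char)) (m : Int × Char) : Prop :=
  m ∈ xs ∧ some m.2 ≠ exc ∧ ∀ e ∈ xs, e ≠ m → (some e.2 = exc ∨ pvKeyA e < pvKeyA m)

-- loop invariant: A's pair list is a permutation of the tree's contents, labels distinct,
-- ≥ 2 entries, and the tree is a BST
def InvP (cs : List (Int × Char)) (t : PQTree) : Prop :=
  cs.Perm t.toList ∧ (cs.map Prod.snd).Nodup ∧ 2 ≤ cs.length ∧ IsBST t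

theorem pvKeyA_inj {a b : Int × Char} (h : pvKeyA a = pvKeyA b) : a = b := by
  simpa [pvKeyA] using h

theorem isSel_perm {exc : Option Char} {xs ys : List (Int × Char)} {m : Int × Char}
    (hp : xs.Perm ys) (h : IsSel exc xs m) : IsSel exc ys m := by
  obtain ⟨h1, h2, h3⟩ := h
  exact ⟨hp.mem_iff.mp h1, h2, fun e he => h3 e (hp.mem_iff.mpr he)⟩

theorem isSel_unique {exc : Option Char} {xs : List (Int × Char)} {m1 m2 : Int × Char}
    (h1 : IsSel exc xs m1) (h2 : IsSel exc xs m2) : m1 = m2 := by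
  by_contra hne
  rcases h1.2.2 m2 h2.1 (fun h => hne h.symm) with h | h
  · exact h2.2.1 h
  · rcases h2.2.2 m1 h1.1 hne with h' | h'
    · exact h1.2.1 h'
    · exact absurd h (not_lt_of_gt h')

theorem toList_insert : ∀ (t : PQTree) (k : Int × Char), (t.insert k).toList.Perm (k :: t.toList) := by
  intro t k
  induction t with
  | nil => simp [PQTree.insert, PQTree.toList]
  | node key l r ihl ihr =>
    rw [PQTree.insert]
    by_cases hc : pvKeyA k < pvKeyA key
    · rw [if_pos hc]
      refine List.perm_iff_count.mpr fun x => ?_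
      have hcl := List.perm_iff_count.mp ihl x
      simp only [PQTree.toList, List.count_cons, List.count_append] at hcl ⊢
      omega
    · rw [if_neg hc]
      refine List.perm_iff_count.mpr fun x => ?_
      have hcr := List.perm_iff_count.mp ihr x
      simp only [PQTree.toList, List.count_cons, List.count_append] at hcr ⊢
      omega

theorem isBST_insert : ∀ (t : PQTree) (k : Int × Char), IsBST t → IsBST (t.insert k) := by
  intro t k
  induction t with
  | nil => intro _; simp [PQTree.insert, IsBST, PQTree.toList]
  | node key l r ihl ihr =>
    intro hb
    rw [PQTree.insert]
    by_cases hc : pvKeyA k < pvKeyA key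
    · rw [if_pos hc]
      refine ⟨?_, hb.2.1, ihl hb.2.2.1, hb.2.2.2⟩
      intro e he
      rcases List.mem_cons.mp ((toList_insert l k).mem_iff.mp he) with rfl | he'
      · exact hc
      · exact hb.1 e he'
    · rw [if_neg hc]
      refine ⟨hb.1, ?_, hb.2.2.1, ihr hb.2.2.2⟩
      intro e he
      rcases List.mem_cons.mp ((toList_insert r k).mem_iff.mp he) with rfl | he'
      · exact not_lt.mp hc
      · exact hb.2.1 e he'

theorem popMax_spec : ∀ (t : PQTree), IsBST t → ∀ (k0 : Int × Char) (l0 r0 : PQTree),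
    t = PQTree.node k0 l0 r0 →
    ∃ m t', t.popMax? = some (m, t') ∧ (m :: t'.toList).Perm t.toList ∧
      (∀ e ∈ t.toList, pvKeyA e ≤ pvKeyA m) ∧ IsBST t' := by
  intro t
  induction t with
  | nil => intro _ k0 l0 r0 h; cases h
  | node k l r ihl ihr =>
    intro hb k0 l0 r0 _
    cases r with
    | nil =>
      refine ⟨k, l, by simp [PQTree.popMax?], by simp [PQTree.toList], ?_, hb.2.2.1⟩
      intro e he
      rcases List.mem_cons.mp he with rfl | he'
      · exact le_refl _
      · rcases List.mem_append.mp he' with h' | h'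
        · exact le_of_lt (hb.1 e h')
        · simp [PQTree.toList] at h'
    | node kr lr rr =>
      obtain ⟨m, r2, hpop, hperm, hmax, hbst⟩ := ihr hb.2.2.2 kr lr rr rfl
      refine ⟨m, PQTree.node k l r2, by rw [PQTree.popMax?, hpop], ?_, ?_, ?_⟩
      · refine List.perm_iff_count.mpr fun x => ?_
        have hc := List.perm_iff_count.mp hperm x
        simp only [PQTree.toList, List.count_cons, List.count_append] at hc ⊢
        omega
      · have hmr : m ∈ (PQTree.node kr lr rr).toList := hperm.subset List.mem_cons_self
        have hkm : pvKeyA k ≤ pvKeyA m := hb.2.1 m hmr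
        intro e he
        rcases List.mem_cons.mp he with rfl | he'
        · exact hkm
        · rcases List.mem_append.mp he' with h' | h'
          · exact le_trans (le_of_lt (hb.1 e h')) hkm
          · exact hmax e h'
      · refine ⟨hb.1, ?_, hb.2.2.1, hbst⟩
        intro e he
        have : e ∈ (PQTree.node kr lr rr).toList := hperm.subset (List.mem_cons_of_mem _ he)
        exact hb.2.1 e this

theorem pop_eq {L : List (Int × Char)} {t : PQTree} {m : Int × Char}
    (hperm : t.toList.Perm L) (hb : IsBST t) (hsel : IsSel none L m) :
    ∃ t', t.popMax? = some (m, t') ∧ t'.toList.Perm (L.erase m) ∧ IsBST t' := by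
  cases t with
  | nil =>
    exfalso
    have := hperm.symm.subset hsel.1
    simp [PQTree.toList] at this
  | node k l r =>
    obtain ⟨m0, t', hpop, hp, hmax, hbst⟩ := popMax_spec (PQTree.node k l r) hb k l r rfl
    have hm0L : m0 ∈ L := hperm.subset (hp.subset List.mem_cons_self)
    have hmm : m0 = m := by
      by_contra hne
      rcases hsel.2.2 m0 hm0L hne with h' | h'
      · simp at h'
      · have hmT : m ∈ (PQTree.node k l r).toList := hperm.symm.subset hsel.1
        exact absurd (hmax m hmT) (not_le_of_gt h')
    subst hmm
    refine ⟨t', hpop, ?_, hbst⟩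
    have h1 : (m0 :: t'.toList).Perm L := hp.trans hperm
    have h2 : L.Perm (m0 :: L.erase m0) := List.perm_cons_erase hm0L
    exact (h1.trans h2).cons_inv

theorem pickA_sorted (last : Char) (s : List (Int × Char)) (x y : Int × Char) (rest : List (Int × Char))
    (hs : s = x :: y :: rest)
    (hpw : s.Pairwise (fun a b => pvKeyA b ≤ pvKeyA a))
    (hnd : (s.map Prod.snd).Nodup) :
    ∃ m : Int × Char, IsSel (some last) s m ∧ (pickA last s).2 = m.2 ∧
      (pickA last s).1.Perm ((m.1 - 1, m.2) :: s.erase m) := by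
  obtain ⟨xc, xl⟩ := x
  obtain ⟨yc, yl⟩ := y
  subst hs
  simp only [List.map_cons, List.nodup_cons, List.mem_cons, List.mem_map] at hnd
  obtain ⟨hx, hy, hrest⟩ := hnd
  rw [List.pairwise_cons] at hpw
  obtain ⟨hx_dom, hpw2⟩ := hpw
  rw [List.pairwise_cons] at hpw2
  obtain ⟨hy_dom, _⟩ := hpw2
  by_cases hlast : last = xl
  · -- skip x, pick y
    have hyx : yl ≠ xl := by
      intro h; exact hx (Or.inl h.symm)
    have hxy : ¬ xl = yl := fun h => hyx h.symm
    have hpick : pickA last ((xc, xl) :: (yc, yl) :: rest) = ((xc, xl) :: (yc - 1, yl) :: rest, yl) := by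
      simp [pickA, hlast, hxy]
    refine ⟨(yc, yl), ⟨List.mem_cons_of_mem _ List.mem_cons_self, ?_, ?_⟩, ?_, ?_⟩
    · simp only [ne_eq, Option.some.injEq]
      intro h; exact hyx (by rw [h, hlast])
    · intro e he hne
      rcases List.mem_cons.mp he with rfl | he'
      · exact Or.inl (by simp [hlast])
      · rcases List.mem_cons.mp he' with rfl | he''
        · exact absurd rfl hne
        · right
          have hle := hy_dom e he''
          cases lt_or_eq_of_le hle with
          | inl h => exact h
          | inr h => exact absurd (pvKeyA_inj h) hne
    · rw [hpick]
    · rw [hpick]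
      have herase : ((xc, xl) :: (yc, yl) :: rest).erase ((yc, yl)) = (xc, xl) :: rest := by
        rw [List.erase_cons_tail (by simp only [beq_iff_eq, Prod.mk.injEq, not_and]; exact fun _ => hxy)]
        rw [List.erase_cons_head]
      rw [herase]
      exact List.Perm.swap _ _ _
  · -- pick x
    have hpick : pickA last ((xc, xl) :: (yc, yl) :: rest) = ((xc - 1, xl) :: (yc, yl) :: rest, xl) := by
      simp [pickA, hlast]
    refine ⟨(xc, xl), ⟨List.mem_cons_self, ?_, ?_⟩, ?_, ?_⟩
    · simp only [ne_eq, Option.some.injEq]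
      intro h; exact hlast h.symm
    · intro e he hne
      rcases List.mem_cons.mp he with rfl | he'
      · exact absurd rfl hne
      · right
        have hle := hx_dom e he'
        cases lt_or_eq_of_le hle with
        | inl h => exact h
        | inr h => exact absurd (pvKeyA_inj h) hne
    · rw [hpick]
    · rw [hpick, List.erase_cons_head]

-- the head of the descending sort is the strict maximum
theorem head_sel {xs : List (Int × Char)} {m : Int × Char} {t : List (Int × Char)}
    (hs : PySem.List.sorted xs pvKeyA true = m :: t) :
    IsSel none xs m := by
  have hmem : m ∈ xs := (PySem.List.sorted_perm xs pvKeyA true).subset (hs ▸ List.mem_cons_self)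
  refine ⟨hmem, by simp, ?_⟩
  intro e he hne
  right
  have hle := PySem.List.key_head_sorted_rev_ge xs pvKeyA hs e he
  cases lt_or_eq_of_le hle with
  | inl h => exact h
  | inr h => exact absurd (pvKeyA_inj h) hne

-- the second element of the descending sort is the strict maximum after the head is removed
theorem second_sel {xs : List (Int × Char)} {m1 m2 : Int × Char} {rest : List (Int × Char)}
    (hs : PySem.List.sorted xs pvKeyA true = m1 :: m2 :: rest) :
    IsSel none (xs.erase m1) m2 := by
  have hperm : (xs.erase m1).Perm (m2 :: rest) := by
    have h1 : xs.Perm (m1 :: m2 :: rest) := ((PySem.List.sorted_perm xs pvKeyA true).symm.trans (by rw [hs])).symm.symm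
    have h2 := h1.erase m1
    rwa [List.erase_cons_head] at h2
  have hpw := PySem.List.sorted_pairwise_rev xs pvKeyA
  rw [hs, List.pairwise_cons] at hpw
  obtain ⟨_, hpw2⟩ := hpw
  rw [List.pairwise_cons] at hpw2
  obtain ⟨hdom2, _⟩ := hpw2
  refine isSel_perm hperm.symm ⟨List.mem_cons_self, by simp, ?_⟩
  intro e he hne
  right
  rcases List.mem_cons.mp he with rfl | he'
  · exact absurd rfl hne
  · cases lt_or_eq_of_le (hdom2 e he') with
    | inl h => exact h
    | inr h => exact absurd (pvKeyA_inj h) hne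

-- the labels of the updated pair list are a permutation of the old labels
theorem labels_dec {cs : List (Int × Char)} {m : Int × Char} (hm : m ∈ cs)
    (hnd : (cs.map Prod.snd).Nodup) :
    ((((m.1 - 1, m.2) :: cs.erase m)).map Prod.snd).Nodup := by
  have h1 : cs.Perm (m :: cs.erase m) := List.perm_cons_erase hm
  have h2 := ((h1.map Prod.snd).nodup_iff).mp hnd
  simpa using h2

theorem step_eq (sol : List Char) (cs : List (Int × Char)) (h : PQTree) (hinv : InvP cs h) :
    (stepA (sol, cs)).1 = (stepB (sol, h)).1 ∧ InvP (stepA (sol, cs)).2 (stepB (sol, h)).2 := by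
  obtain ⟨hperm, hnd, hlen, hheap⟩ := hinv
  have hsp : (PySem.List.sorted cs pvKeyA true).Perm cs := PySem.List.sorted_perm _ _ _
  have hlen' : 2 ≤ (PySem.List.sorted cs pvKeyA true).length := by
    rw [hsp.length_eq]; exact hlen
  obtain ⟨x, y, rest, hsxy⟩ : ∃ x y rest, PySem.List.sorted cs pvKeyA true = x :: y :: rest := by
    rcases hsc : PySem.List.sorted cs pvKeyA true with _ | ⟨x, _ | ⟨y, rest⟩⟩
    · rw [hsc] at hlen'; simp at hlen'
    · rw [hsc] at hlen'; simp at hlen'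
    · exact ⟨x, y, rest, rfl⟩
  have hnds : ((PySem.List.sorted cs pvKeyA true).map Prod.snd).Nodup :=
    ((hsp.map Prod.snd).nodup_iff).mpr hnd
  obtain ⟨m, hselm, hlab, hpermres⟩ :=
    pickA_sorted (sol.getLastD ' ') _ x y rest hsxy (PySem.List.sorted_pairwise_rev cs pvKeyA) hnds
  have hxy2 : x.2 ≠ y.2 := by
    rw [hsxy] at hnds
    simp only [List.map_cons, List.nodup_cons, List.mem_cons, List.mem_map] at hnds
    exact fun hq => hnds.1 (Or.inl hq)
  have hselx : IsSel none cs x := head_sel hsxy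
  obtain ⟨h1, hpop1, hperm1, hheap1⟩ := pop_eq hperm.symm hheap hselx
  have hme : m ∈ PySem.List.sorted cs pvKeyA true := hselm.1
  have hA1 : (stepA (sol, cs)).1 = sol ++ [m.2] := by
    show sol ++ [(pickA (sol.getLastD ' ') (PySem.List.sorted cs pvKeyA true)).2] = sol ++ [m.2]
    rw [hlab]
  have hA2 : (stepA (sol, cs)).2 = (pickA (sol.getLastD ' ') (PySem.List.sorted cs pvKeyA true)).1 := rfl
  have herase_cs : (cs.erase x).Perm (y :: rest) := by
    have h2 := (hsp.symm.trans (by rw [hsxy])).erase x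
    rwa [List.erase_cons_head] at h2
  have hsub : ∀ e ∈ PySem.List.sorted cs pvKeyA true, e ∈ cs := fun e he => hsp.subset he
  -- pairwise of the sorted list, for building IsSel facts
  have hpw := PySem.List.sorted_pairwise_rev cs pvKeyA
  rw [hsxy, List.pairwise_cons] at hpw
  obtain ⟨hx_dom, hpw2⟩ := hpw
  rw [List.pairwise_cons] at hpw2
  obtain ⟨hy_dom, _⟩ := hpw2
  by_cases hcase : x.2 = sol.getLastD ' '
  · -- B pops the max x, holds it, pops y, re-inserts x
    have hsel2 : IsSel none (cs.erase x) y := second_sel hsxy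
    obtain ⟨h2, hpop2, hperm2, hheap2⟩ := pop_eq hperm1 hheap1 hsel2
    have hselY : IsSel (some (sol.getLastD ' ')) (PySem.List.sorted cs pvKeyA true) y := by
      refine ⟨by rw [hsxy]; exact List.mem_cons_of_mem _ List.mem_cons_self, ?_, ?_⟩
      · simp only [ne_eq, Option.some.injEq]
        intro hq; exact hxy2 (by rw [hcase, hq])
      · intro e he hne
        rw [hsxy] at he
        rcases List.mem_cons.mp he with rfl | he'
        · exact Or.inl (by rw [hcase])
        · rcases List.mem_cons.mp he' with rfl | he''
          · exact absurd rfl hne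
          · right
            cases lt_or_eq_of_le (hy_dom e he'') with
            | inl hq => exact hq
            | inr hq => exact absurd (pvKeyA_inj hq) hne
    have hm : m = y := isSel_unique hselm hselY
    have hstB : stepB (sol, h) = (sol ++ [y.2], (h2.insert x).insert (y.1 - 1, y.2)) := by
      simp only [stepB, hpop1, hpop2]
      rw [if_pos hcase]
    constructor
    · rw [hA1, hstB, hm]
    · rw [hstB]
      have hAperm : (stepA (sol, cs)).2.Perm ((y.1 - 1, y.2) :: (PySem.List.sorted cs pvKeyA true).erase y) := by
        rw [hA2]; simpa [hm] using hpermres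
      have hxny : x ≠ y := fun hq => hxy2 (by rw [hq])
      have heraseY : (PySem.List.sorted cs pvKeyA true).erase y = x :: rest := by
        rw [hsxy, List.erase_cons_tail (by simp only [beq_iff_eq]; exact fun hq => hxny hq),
          List.erase_cons_head]
      have hBtl : ((h2.insert x).insert (y.1 - 1, y.2)).toList.Perm ((y.1 - 1, y.2) :: x :: rest) := by
        refine (toList_insert _ _).trans (List.Perm.cons _ ?_)
        refine (toList_insert _ _).trans (List.Perm.cons _ ?_)
        refine hperm2.trans ?_
        have h2' := herase_cs.erase y
        rwa [List.erase_cons_head] at h2'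
      refine ⟨?_, ?_, ?_, isBST_insert _ _ (isBST_insert _ _ hheap2)⟩
      · refine hAperm.trans ?_
        rw [heraseY]
        exact hBtl.symm
      · have hlabels := labels_dec hme hnds
        have hA' : (stepA (sol, cs)).2.Perm ((m.1 - 1, m.2) :: (PySem.List.sorted cs pvKeyA true).erase m) := by
          rw [hA2]; exact hpermres
        exact ((hA'.map Prod.snd).nodup_iff).mpr hlabels
      · have := hAperm.length_eq
        rw [heraseY] at this
        simp only [List.length_cons] at this
        have hres : rest.length + 2 = cs.length := by
          have := congrArg List.length hsxy
          rw [hsp.length_eq] at this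
          simp at this
          omega
        omega
  · -- B pops the top x and keeps it
    have hselX : IsSel (some (sol.getLastD ' ')) (PySem.List.sorted cs pvKeyA true) x := by
      refine ⟨by rw [hsxy]; exact List.mem_cons_self, ?_, ?_⟩
      · simp only [ne_eq, Option.some.injEq]
        exact hcase
      · intro e he hne
        right
        rw [hsxy] at he
        rcases List.mem_cons.mp he with rfl | he'
        · exact absurd rfl hne
        · cases lt_or_eq_of_le (hx_dom e he') with
          | inl hq => exact hq
          | inr hq => exact absurd (pvKeyA_inj hq) hne
    have hm : m = x := isSel_unique hselm hselX
    have hstB : stepB (sol, h) = (sol ++ [x.2], h1.insert (x.1 - 1, x.2)) := by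
      simp only [stepB, hpop1]
      rw [if_neg hcase]
    constructor
    · rw [hA1, hstB, hm]
    · rw [hstB]
      have hAperm : (stepA (sol, cs)).2.Perm ((x.1 - 1, x.2) :: (PySem.List.sorted cs pvKeyA true).erase x) := by
        rw [hA2]; simpa [hm] using hpermres
      have heraseX : (PySem.List.sorted cs pvKeyA true).erase x = y :: rest := by
        rw [hsxy, List.erase_cons_head]
      have hBtl : (h1.insert (x.1 - 1, x.2)).toList.Perm ((x.1 - 1, x.2) :: y :: rest) := by
        refine (toList_insert _ _).trans (List.Perm.cons _ ?_)
        exact hperm1.trans herase_cs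
      refine ⟨?_, ?_, ?_, isBST_insert _ _ hheap1⟩
      · refine hAperm.trans ?_
        rw [heraseX]
        exact hBtl.symm
      · have hlabels := labels_dec hme hnds
        have hA' : (stepA (sol, cs)).2.Perm ((m.1 - 1, m.2) :: (PySem.List.sorted cs pvKeyA true).erase m) := by
          rw [hA2]; exact hpermres
        exact ((hA'.map Prod.snd).nodup_iff).mpr hlabels
      · have := hAperm.length_eq
        rw [heraseX] at this
        simp only [List.length_cons] at this
        have hres : rest.length + 2 = cs.length := by
          have := congrArg List.length hsxy
          rw [hsp.length_eq] at this
          simp at this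
          omega
        omega

theorem loop_eq' : ∀ (L : List Int) (stA : List Char × List (Int × Char)) (stB : List Char × PQTree),
    stA.1 = stB.1 → InvP stA.2 stB.2 →
    (L.foldl (fun st _ => stepA st) stA).1 = (L.foldl (fun st _ => stepB st) stB).1 ∧
    InvP (L.foldl (fun st _ => stepA st) stA).2 (L.foldl (fun st _ => stepB st) stB).2 := by
  intro L
  induction L with
  | nil => intro stA stB h1 h2; exact ⟨h1, h2⟩
  | cons i L ih =>
    intro stA stB h1 h2
    have hB : stB = (stA.1, stB.2) := by rw [h1]
    have hA : stA = (stA.1, stA.2) := rfl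
    obtain ⟨hs1, hs2⟩ := step_eq stA.1 stA.2 stB.2 h2
    simp only [List.foldl]
    rw [hB, hA]
    exact ih _ _ hs1 hs2

theorem init_eq (colors : List Int) (h : colors.length ≤ 6) :
    (PySem.List.enumerate colors).map
      (fun p => (p.2, PySem.List.pyGetD (['R', 'O', 'Y', 'G', 'B', 'V'] : List Char) p.1 ' '))
      = colors.zip (['R', 'O', 'Y', 'G', 'B', 'V'] : List Char) := by
  apply List.ext_getElem
  · simp only [List.length_map, PySem.List.length_enumerate, List.length_zip, List.length_cons,
      List.length_nil]
    omega
  · intro i h1 h2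
    simp only [List.length_map, PySem.List.length_enumerate] at h1
    rw [List.getElem_map, List.getElem_zip, PySem.List.getElem_enumerate]
    refine Prod.ext rfl ?_
    show PySem.List.pyGetD _ ((0 : Int) + (i : Int)) ' ' = _
    rw [PySem.List.pyGetD_eq_getElem _ _ (by omega) (by simp; omega)]
    congr 1
    omega

theorem zip_snd_take (l1 : List Int) (l2 : List Char) :
    (l1.zip l2).map Prod.snd = l2.take l1.length := by
  induction l1 generalizing l2 with
  | nil => simp
  | cons a t ih =>
    cases l2 with
    | nil => simp
    | cons b u => simp [ih]

theorem items0_nodup (colors : List Int) :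
    ((colors.zip (['R', 'O', 'Y', 'G', 'B', 'V'] : List Char)).map Prod.snd).Nodup := by
  rw [zip_snd_take]
  exact (List.take_sublist _ _).nodup (by decide)

theorem build_tree : ∀ (L : List (Int × Char)) (acc : PQTree), IsBST acc →
    IsBST (L.foldl (fun t e => t.insert e) acc) ∧
    (L.foldl (fun t e => t.insert e) acc).toList.Perm (L ++ acc.toList) := by
  intro L
  induction L with
  | nil => intro acc ha; exact ⟨ha, by simp⟩
  | cons e t ih =>
    intro acc ha
    obtain ⟨h1, h2⟩ := ih (acc.insert e) (isBST_insert _ _ ha)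
    refine ⟨h1, h2.trans ?_⟩
    exact (List.Perm.append_left t (toList_insert acc e)).trans List.perm_middle

-- ===== VERDICT (by name: the statement is the Claim_ definition above) =====
theorem solve_spec : Claim_equal_solve := by
  intro n colors _ hpre
  obtain ⟨hge1, hle6, hone⟩ := hpre
  unfold Spec_solve solve solve_alt
  simp only []
  rw [init_eq colors hle6]
  have hlen0 : (colors.zip (['R', 'O', 'Y', 'G', 'B', 'V'] : List Char)).length = colors.length := by
    rw [List.length_zip]; simp; omega
  have hnd0 := items0_nodup colors
  obtain ⟨hH0, hP0⟩ := build_tree (colors.zip (['R', 'O', 'Y', 'G', 'B', 'V'] : List Char)) PQTree.nil trivial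
  have hP0' : ((colors.zip (['R', 'O', 'Y', 'G', 'B', 'V'] : List Char)).foldl (fun t e => t.insert e) PQTree.nil).toList.Perm
      (colors.zip (['R', 'O', 'Y', 'G', 'B', 'V'] : List Char)) := by
    simpa [PQTree.toList] using hP0
  cases hS0 : PySem.List.sorted (colors.zip (['R', 'O', 'Y', 'G', 'B', 'V'] : List Char)) pvKeyA true with
  | nil =>
    rw [PySem.List.sorted_eq_nil_iff] at hS0
    have : colors.length = 0 := by rw [← hlen0, hS0]; rfl
    omega
  | cons m0 t0 =>
    obtain ⟨c0, l0⟩ := m0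
    have hsel0 : IsSel none (colors.zip (['R', 'O', 'Y', 'G', 'B', 'V'] : List Char)) (c0, l0) :=
      head_sel hS0
    obtain ⟨h1, hpop0, hperm1, hheap1⟩ := pop_eq hP0' hH0 hsel0
    simp only [hpop0]
    by_cases hImp : c0 * 2 > n
    · simp [hImp]
    · simp only [if_neg hImp]
      have hlen2 : 2 ≤ colors.length := by
        by_contra hc
        have hl1 : colors.length = 1 := by omega
        obtain ⟨c, colors', hcc⟩ : ∃ c colors', colors = c :: colors' := by
          cases colors with
          | nil => simp at hl1
          | cons c t => exact ⟨c, t, rfl⟩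
        subst hcc
        have : colors' = [] := by simpa using hl1
        subst this
        have hsing : PySem.List.sorted ([(c, 'R')] : List (Int × Char)) pvKeyA true = [(c, 'R')] :=
          PySem.List.sorted_rev_eq_self_of_pairwise _ _ (List.pairwise_singleton _ _)
        rw [show ([c].zip (['R', 'O', 'Y', 'G', 'B', 'V'] : List Char)) = [(c, 'R')] by rfl, hsing] at hS0
        have hc0 : c0 = c := by simp at hS0; exact hS0.1.1.symm
        have := hone rfl
        simp at this
        omega
      -- initial invariant
      have ht0 : ((colors.zip (['R', 'O', 'Y', 'G', 'B', 'V'] : List Char)).erase (c0, l0)).Perm t0 := by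
        have h2 := ((PySem.List.sorted_perm (colors.zip (['R', 'O', 'Y', 'G', 'B', 'V'] : List Char)) pvKeyA true).symm.trans
          (by rw [hS0])).erase (c0, l0)
        rwa [List.erase_cons_head] at h2
      have hinv0 : InvP ((c0 - 1, l0) :: t0) (h1.insert (c0 - 1, l0)) := by
        refine ⟨?_, ?_, ?_, isBST_insert _ _ hheap1⟩
        · exact (List.Perm.cons _ (hperm1.trans ht0).symm).symm.symm.trans
            ((toList_insert h1 (c0 - 1, l0)).symm)
        · have hnds0 : ((PySem.List.sorted (colors.zip (['R', 'O', 'Y', 'G', 'B', 'V'] : List Char)) pvKeyA true).map Prod.snd).Nodup :=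
            (((PySem.List.sorted_perm _ _ _).map Prod.snd).nodup_iff).mpr hnd0
          have hm0 : ((c0, l0) : Int × Char) ∈ PySem.List.sorted (colors.zip (['R', 'O', 'Y', 'G', 'B', 'V'] : List Char)) pvKeyA true := by
            rw [hS0]; exact List.mem_cons_self
          have hlabels := labels_dec hm0 hnds0
          rw [hS0, List.erase_cons_head] at hlabels
          exact hlabels
        · have hlt0 : t0.length + 1 = colors.length := by
            have := congrArg List.length hS0
            rw [(PySem.List.sorted_perm _ _ _).length_eq, hlen0] at this
            simp at this
            omega
          simp only [List.length_cons]
          omega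
      obtain ⟨hfst, hinv⟩ := loop_eq' (PySem.List.pyRange 0 (n - 3) 1)
        ([l0], (c0 - 1, l0) :: t0) ([l0], h1.insert (c0 - 1, l0)) rfl hinv0
      obtain ⟨hpermF, hndF, hlenF, hheapF⟩ := hinv
      have hlenA : 2 ≤ (((PySem.List.pyRange 0 (n - 3) 1).foldl (fun st _ => stepA st)
          ([l0], (c0 - 1, l0) :: t0)).2).length := hlenF
      cases hS1 : PySem.List.sorted (((PySem.List.pyRange 0 (n - 3) 1).foldl (fun st _ => stepA st)
          ([l0], (c0 - 1, l0) :: t0)).2) pvKeyA true with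
      | nil =>
        rw [PySem.List.sorted_eq_nil_iff] at hS1
        rw [hS1] at hlenA
        simp at hlenA
      | cons m1 t1 =>
        cases t1 with
        | nil =>
          have := congrArg List.length hS1
          rw [(PySem.List.sorted_perm _ _ _).length_eq] at this
          simp at this
          omega
        | cons m2 rest =>
          obtain ⟨a1, b1⟩ := m1
          obtain ⟨a2, b2⟩ := m2
          obtain ⟨hB1, hpopF1, hpermF1, hheapF1⟩ := pop_eq hpermF.symm hheapF (head_sel hS1)
          obtain ⟨hB2, hpopF2, hpermF2, hheapF2⟩ := pop_eq hpermF1 hheapF1 (second_sel hS1)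
          simp only [hpopF1, hpopF2, ← hfst]
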